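-- pv_equiv track=rewrite | github.com/neosigmaai/auto-harness | agent/swe/log_collapse.py | collapse_duplicate_blocks
-- ===== SOURCE A (Python) =====
-- def collapse_duplicate_blocks(blocks: list[str]) -> list[str]:
--     if not blocks:
--         return []
--     out: list[str] = []
--     i = 0
--     while i < len(blocks):
--         j = i + 1
--         while j < len(blocks) and blocks[j] == blocks[i]:
--             j += 1
--         run_len = j - i
--         out.append(blocks[i])
--         if run_len > 1:
--             out.append(
--                 f"\n[... omitted {run_len - 1} duplicate block(s) identical to the block above ...]\n"
--             )
--         i = j
--     return out
-- ===== SOURCE B (Python) =====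
-- def collapse_duplicate_blocks(blocks: list[str]) -> list[str]:
--     # Two-phase: run-length encode (built back-to-front), then emit blocks with omission notes.
--     groups: list[tuple[str, int]] = []
--     for block in reversed(blocks):
--         if groups and groups[0][0] == block:
--             groups[0] = (block, groups[0][1] + 1)
--         else:
--             groups.insert(0, (block, 1))
--     out: list[str] = []
--     for block, n in groups:
--         out.append(block)
--         if n > 1:
--             out.append(
--                 f"\n[... omitted {n - 1} duplicate block(s) identical to the block above ...]\n"
--             )
--     return out
-- ===== Notes on version B (the rewrite author's own statement) =====
-- stated objective: alternative
-- what changed: Replaced the nested index-scanning while loops with a two-phase pass: build a run-length encoding back-to-front, then emit each (block, count) group with its omission note; the empty case falls out naturally.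
import Mathlib
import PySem

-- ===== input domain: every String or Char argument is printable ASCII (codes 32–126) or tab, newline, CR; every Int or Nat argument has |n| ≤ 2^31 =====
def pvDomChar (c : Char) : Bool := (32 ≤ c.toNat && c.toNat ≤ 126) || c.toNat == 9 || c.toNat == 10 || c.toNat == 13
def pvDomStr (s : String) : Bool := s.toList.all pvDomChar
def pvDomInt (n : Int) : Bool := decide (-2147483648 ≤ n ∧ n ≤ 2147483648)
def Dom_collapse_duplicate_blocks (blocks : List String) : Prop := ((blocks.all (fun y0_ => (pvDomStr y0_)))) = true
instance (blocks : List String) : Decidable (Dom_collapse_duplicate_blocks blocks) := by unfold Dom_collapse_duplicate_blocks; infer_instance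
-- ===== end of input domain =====

-- B replaces the nested index-scanning loops by a two-phase pass (run-length encode, then emit); alternative decomposition.

-- ===== PORT A =====
-- the omission-note f-string (shared by both ports; identical text in both Pythons)
def pvNote (k : Nat) : String :=
  "\n[... omitted " ++ PySem.Int.toStr (k : Int) ++ " duplicate block(s) identical to the block above ...]\n"

-- inner 'while j < len(blocks) and blocks[j] == blocks[i]: j += 1' (cur = blocks[i])
def aInner (blocks : List String) (cur : String) (j : Nat) : Nat :=
  if j < blocks.length ∧ blocks.getD j "" = cur then aInner blocks cur (j + 1) else j
termination_by blocks.length - j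
decreasing_by omega

theorem aInner_ge (blocks : List String) (cur : String) (j : Nat) : j ≤ aInner blocks cur j := by
  fun_induction aInner <;> omega

-- outer 'while i < len(blocks)' loop, accumulating out
def aOuter (blocks : List String) (i : Nat) (out : List String) : List String :=
  if h : i < blocks.length then
    let j := aInner blocks (blocks.getD i "") (i + 1)
    let run_len := j - i
    let out1 := out ++ [blocks.getD i ""]
    let out2 := if run_len > 1 then out1 ++ [pvNote (run_len - 1)] else out1
    aOuter blocks j out2
  else out
termination_by blocks.length - i
decreasing_by
  have := aInner_ge blocks (blocks.getD i "") (i + 1); omega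

def collapse_duplicate_blocks (blocks : List String) : List String :=
  if blocks = [] then [] else aOuter blocks 0 []

-- ===== PORT B =====
-- phase 1: run-length encoding built back-to-front (the reversed-loop of Source B, as a foldr)
def bGroups (blocks : List String) : List (String × Nat) :=
  blocks.foldr
    (fun block groups =>
      match groups with
      | (y, n) :: rest => if y = block then (block, n + 1) :: rest else (block, 1) :: (y, n) :: rest
      | [] => [(block, 1)])
    []

-- phase 2: emit each group, with the omission note when n > 1
def bEmit (groups : List (String × Nat)) : List String :=
  groups.flatMap (fun p => p.1 :: (if p.2 > 1 then [pvNote (p.2 - 1)] else []))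

def collapse_duplicate_blocks_alt (blocks : List String) : List String :=
  bEmit (bGroups blocks)

-- ===== PRECONDITION & SPEC =====
def Spec_collapse_duplicate_blocks (blocks : List String) (out : List String) : Prop := out = collapse_duplicate_blocks_alt blocks
instance (blocks : List String) (out : List String) : Decidable (Spec_collapse_duplicate_blocks blocks out) := by unfold Spec_collapse_duplicate_blocks; infer_instance

-- ===== CLAIM (what is proved, stated in full; the proofs are below) =====
def Claim_equal_collapse_duplicate_blocks : Prop := ∀ (blocks : List String), Dom_collapse_duplicate_blocks blocks → Spec_collapse_duplicate_blocks blocks (collapse_duplicate_blocks blocks)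

-- ===== LEMMAS AND PROOFS =====

theorem dropWhile_eq_drop_takeWhile (p : String → Bool) :
    ∀ (l : List String), l.dropWhile p = l.drop (l.takeWhile p).length := by
  intro l
  induction l with
  | nil => rfl
  | cons x t ih =>
      by_cases hx : p x = true
      · simp [List.dropWhile_cons, hx, ih]
      · simp [List.dropWhile_cons, hx]

theorem aInner_eq (blocks : List String) (cur : String) (j : Nat) :
    aInner blocks cur j = j + ((blocks.drop j).takeWhile (· = cur)).length := by
  fun_induction aInner with
  | case1 j h ih =>
      obtain ⟨hj, he⟩ := h
      have he' : blocks[j] = cur := by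
        simpa [List.getD_eq_getElem?_getD, List.getElem?_eq_getElem hj] using he
      rw [List.drop_eq_getElem_cons hj]
      simp [he', ih]
      omega
  | case2 j h =>
      rcases Nat.lt_or_ge j blocks.length with hj | hj
      · have he : ¬ blocks[j] = cur := by
          intro hc
          exact h ⟨hj, by simp [List.getD_eq_getElem?_getD, List.getElem?_eq_getElem hj, hc]⟩
        rw [List.drop_eq_getElem_cons hj]
        simp [he]
      · simp [List.drop_eq_nil_of_le hj]

theorem bGroups_cons (x : String) (l : List String) :
    bGroups (x :: l) = (x, (l.takeWhile (· = x)).length + 1) :: bGroups (l.dropWhile (· = x)) := by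
  induction l generalizing x with
  | nil => simp [bGroups]
  | cons y t ih =>
      have hstep : bGroups (x :: y :: t) =
          (match bGroups (y :: t) with
            | (z, n) :: rest => if z = x then (x, n + 1) :: rest else (x, 1) :: (z, n) :: rest
            | [] => [(x, 1)]) := rfl
      rw [hstep, ih y]
      by_cases hxy : y = x
      · subst hxy
        simp
      · simp only [List.takeWhile_cons, List.dropWhile_cons, hxy, if_neg, decide_eq_true_eq,
          decide_false, Bool.false_eq_true, if_false]
        simp
        exact (ih y).symm

theorem aOuter_eq (blocks : List String) (i : Nat) (out : List String) :
    aOuter blocks i out = out ++ bEmit (bGroups (blocks.drop i)) := by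
  fun_induction aOuter with
  | case1 i out h j run_len out1 out2 ih =>
      have hx : blocks.getD i "" = blocks[i] := by
        simp [List.getD_eq_getElem?_getD, List.getElem?_eq_getElem h]
      have hj : j = i + 1 + ((blocks.drop (i+1)).takeWhile (· = blocks[i])).length := by
        simp only [j]; rw [aInner_eq, hx]
      set k := ((blocks.drop (i+1)).takeWhile (· = blocks[i])).length with hk
      have hdropw : (blocks.drop (i+1)).dropWhile (· = blocks[i]) = blocks.drop j := by
        rw [dropWhile_eq_drop_takeWhile, ← hk, List.drop_drop, hj]
      have hdi : blocks.drop i = blocks[i] :: blocks.drop (i + 1) := List.drop_eq_getElem_cons h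
      rw [ih, hdi, bGroups_cons, ← hk, hdropw]
      have hrun : run_len = k + 1 := by simp only [run_len, hj]; omega
      simp only [bEmit, List.flatMap_cons]
      by_cases hk1 : k = 0
      · have hn : ¬ run_len > 1 := by omega
        simp only [out2, out1, hrun, hk1]
        simp [List.getElem?_eq_getElem h]
      · have h1 : run_len > 1 := by omega
        have h2 : (k + 1 > 1) = True := by simp; omega
        have h3 : run_len - 1 = k := by omega
        simp only [out2, out1, hrun, h2, if_true]
        simp [List.getElem?_eq_getElem h]
  | case2 i out h =>
      have hnil : blocks.drop i = [] := List.drop_eq_nil_of_le (by omega)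
      simp [hnil, bGroups, bEmit]

-- ===== VERDICT (by name: the statement is the Claim_ definition above) =====
theorem collapse_duplicate_blocks_spec : Claim_equal_collapse_duplicate_blocks := by
  intro blocks _
  unfold Spec_collapse_duplicate_blocks collapse_duplicate_blocks collapse_duplicate_blocks_alt
  split
  · subst ‹blocks = []›; rfl
  · simpa using aOuter_eq blocks 0 []
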